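-- pv_equiv track=rewrite | github.com/parkerahall/dailycodingchallenge | 1-15-19.py | palindrome_finder_fewest
-- ===== SOURCE A (Python) =====
-- def palindrome_finder_fewest(string):
--     letters = []
--     additions = 0
--     front = 0
--     back = len(string) - 1
--     while front <= back:
--         if string[front] == string[back]:
--             letters.append(string[front])
--             front += 1
--             back -= 1
--         else:
--             letters.append(string[back])
--             additions += 1
--             back -= 1
--     if (len(string) + additions) % 2:
--         return "".join(letters) + "".join(letters[:-1][::-1])
--     else:
--         return "".join(letters) + "".join(letters[::-1])
-- ===== SOURCE B (Python) =====
-- def palindrome_finder_fewest(string):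
--     n = len(string)
--     rev = string[::-1]
--     i = j = 0
--     while i + j < n:
--         if string[i] == rev[j]:
--             i += 1
--         j += 1
--     suffix = string[n - j:]
--     if i + j == n + 1:
--         return suffix[::-1] + suffix[1:]
--     return suffix[::-1] + suffix
-- ===== Notes on version B (the rewrite author's own statement) =====
-- stated objective: alternative
-- what changed: B replaces A's accumulated letters list, additions counter and parity-based join with a pure two-counter scan (matches i, iterations j) of the string against its reverse; the output is then assembled directly from slices of the input's last j characters.
import Mathlib
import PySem

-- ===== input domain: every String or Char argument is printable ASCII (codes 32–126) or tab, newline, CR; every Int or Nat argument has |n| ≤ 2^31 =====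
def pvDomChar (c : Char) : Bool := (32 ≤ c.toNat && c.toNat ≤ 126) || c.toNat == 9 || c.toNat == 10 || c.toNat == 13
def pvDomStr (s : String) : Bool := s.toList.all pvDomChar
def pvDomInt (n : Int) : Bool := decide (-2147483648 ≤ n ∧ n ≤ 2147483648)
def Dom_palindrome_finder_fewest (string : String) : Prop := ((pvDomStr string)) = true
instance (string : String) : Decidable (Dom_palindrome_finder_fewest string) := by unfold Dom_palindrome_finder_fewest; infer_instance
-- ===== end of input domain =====

-- B replaces A's letters/additions accumulation and parity join with a two-counter scan against the
-- reversed string, assembling the output from slices of the input (objective: alternative).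

-- ===== PORT A =====
-- A's while loop: letters accumulator, additions counter, front/back indices.
-- (fuel is only a structural-recursion guard; s.length + 1 always suffices, since back - front shrinks each iteration)
def pfLoopA (s : List Char) (fuel : Nat) (letters : List Char) (additions front back : Int) :
    List Char × Int :=
  match fuel with
  | 0 => (letters, additions)
  | fuel + 1 =>
    if front ≤ back then
      if PySem.List.pyGet? s front = PySem.List.pyGet? s back then
        pfLoopA s fuel (letters ++ [(PySem.List.pyGet? s front).getD ' ']) additions (front + 1) (back - 1)
      else
        pfLoopA s fuel (letters ++ [(PySem.List.pyGet? s back).getD ' ']) (additions + 1) front (back - 1)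
    else
      (letters, additions)

def palindrome_finder_fewest (string : String) : String :=
  let s := string.toList
  let p := pfLoopA s (s.length + 1) [] 0 0 ((s.length : Int) - 1)
  if ((s.length : Int) + p.2) % 2 ≠ 0 then
    String.ofList (p.1 ++ p.1.dropLast.reverse)
  else
    String.ofList (p.1 ++ p.1.reverse)

-- ===== PORT B =====
-- B's while loop: i counts matches, j counts iterations; no accumulator.
-- (fuel is only a structural-recursion guard; n + 1 always suffices, since i + j grows each iteration)
def pfLoopB (s rev : List Char) (n : Nat) (fuel : Nat) (i j : Nat) : Nat × Nat :=
  match fuel with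
  | 0 => (i, j)
  | fuel + 1 =>
    if i + j < n then
      if PySem.List.pyGet? s (i : Int) = PySem.List.pyGet? rev (j : Int) then
        pfLoopB s rev n fuel (i + 1) (j + 1)
      else
        pfLoopB s rev n fuel i (j + 1)
    else
      (i, j)

def palindrome_finder_fewest_alt (string : String) : String :=
  let s := string.toList
  let n := s.length
  let rev := s.reverse
  let p := pfLoopB s rev n (n + 1) 0 0
  let suffix := s.drop (n - p.2)
  if p.1 + p.2 = n + 1 then
    String.ofList (suffix.reverse ++ suffix.drop 1)
  else
    String.ofList (suffix.reverse ++ suffix)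

-- ===== PRECONDITION & SPEC =====
def Spec_palindrome_finder_fewest (string : String) (out : String) : Prop := out = palindrome_finder_fewest_alt string
instance (string : String) (out : String) : Decidable (Spec_palindrome_finder_fewest string out) := by unfold Spec_palindrome_finder_fewest; infer_instance

-- ===== CLAIM (what is proved, stated in full; the proofs are below) =====
def Claim_equal_palindrome_finder_fewest : Prop := ∀ (string : String), Dom_palindrome_finder_fewest string → Spec_palindrome_finder_fewest string (palindrome_finder_fewest string)

-- ===== LEMMAS AND PROOFS =====

-- The two loops run in lockstep: A's (front, back) is B's (i, n-1-j); the chars A appends are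
-- exactly rev[j], rev[j+1], …, and A's additions count is (j'-j) - (i'-i).
theorem loops_corr (s : List Char) :
    ∀ (fuel : Nat) (i j : Nat) (letters : List Char) (additions : Int),
      s.length - (i + j) < fuel → i + j ≤ s.length + 1 → j ≤ s.length →
      pfLoopA s fuel letters additions (i : Int) ((s.length : Int) - 1 - (j : Int)) =
        (letters ++ ((s.reverse.drop j).take ((pfLoopB s s.reverse s.length fuel i j).2 - j)),
         additions + (((pfLoopB s s.reverse s.length fuel i j).2 : Int) - (j : Int)
           - ((pfLoopB s s.reverse s.length fuel i j).1 : Int) + (i : Int)))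
      ∧ i ≤ (pfLoopB s s.reverse s.length fuel i j).1
      ∧ j ≤ (pfLoopB s s.reverse s.length fuel i j).2
      ∧ s.length ≤ (pfLoopB s s.reverse s.length fuel i j).1 + (pfLoopB s s.reverse s.length fuel i j).2
      ∧ (pfLoopB s s.reverse s.length fuel i j).1 + (pfLoopB s s.reverse s.length fuel i j).2 ≤ s.length + 1
      ∧ (pfLoopB s s.reverse s.length fuel i j).2 ≤ s.length := by
  intro fuel
  induction fuel with
  | zero =>
    intro i j letters additions hfuel hsum hj
    exact absurd hfuel (Nat.not_lt_zero _)
  | succ fuel ih =>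
    intro i j letters additions hfuel hsum hj
    by_cases h : i + j < s.length
    · have hjlt : j < s.length := by omega
      have hilt : i < s.length := by omega
      have hjrev : j < s.reverse.length := by simpa using hjlt
      have hcondA : (i : Int) ≤ (s.length : Int) - 1 - (j : Int) := by omega
      have hidx : PySem.List.pyGet? s ((s.length : Int) - 1 - (j : Int)) =
          PySem.List.pyGet? s.reverse (j : Int) := by
        have h1 : ((s.length : Int) - 1 - (j : Int)) = ((s.length - 1 - j : Nat) : Int) := by omega
        rw [h1, PySem.List.pyGet?_natCast, PySem.List.pyGet?_natCast,
          List.getElem?_reverse hjlt]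
      rw [pfLoopA, pfLoopB]
      rw [if_pos hcondA, if_pos h, hidx]
      have hrevj : PySem.List.pyGet? s.reverse (j : Int) = some (s.reverse[j]'hjrev) := by
        rw [PySem.List.pyGet?_natCast, List.getElem?_eq_getElem hjrev]
      by_cases hc : PySem.List.pyGet? s (i : Int) = PySem.List.pyGet? s.reverse (j : Int)
      · simp only [if_pos hc]
        have hstepA : ((i : Int) + 1) = ((i + 1 : Nat) : Int) := by omega
        have hstepB : ((s.length : Int) - 1 - (j : Int) - 1) =
            ((s.length : Int) - 1 - ((j + 1 : Nat) : Int)) := by omega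
        have hcval : (PySem.List.pyGet? s (i : Int)).getD ' ' = s.reverse[j]'hjrev := by
          rw [hc, hrevj]; rfl
        obtain ⟨heq, h1, h2, h3, h4, h5⟩ :=
          ih (i + 1) (j + 1) (letters ++ [(PySem.List.pyGet? s (i : Int)).getD ' '])
            additions (by omega) (by omega) (by omega)
        rw [hstepA, hstepB, heq]
        set p := pfLoopB s s.reverse s.length fuel (i + 1) (j + 1) with hp
        refine ⟨?_, by omega, by omega, by omega, by omega, by omega⟩
        have hdrop : s.reverse.drop j = s.reverse[j]'hjrev :: s.reverse.drop (j + 1) :=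
          List.drop_eq_getElem_cons hjrev
        have htk : p.2 - j = (p.2 - (j + 1)) + 1 := by omega
        rw [hdrop, htk, List.take_succ_cons, hcval, List.append_assoc]
        simp only [Prod.mk.injEq]
        exact ⟨by simp, by push_cast; ring⟩
      · simp only [if_neg hc]
        have hstepB : ((s.length : Int) - 1 - (j : Int) - 1) =
            ((s.length : Int) - 1 - ((j + 1 : Nat) : Int)) := by omega
        have hcval : (PySem.List.pyGet? s.reverse (j : Int)).getD ' ' = s.reverse[j]'hjrev := by
          rw [hrevj]; rfl
        obtain ⟨heq, h1, h2, h3, h4, h5⟩ :=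
          ih i (j + 1) (letters ++ [(PySem.List.pyGet? s.reverse (j : Int)).getD ' '])
            (additions + 1) (by omega) (by omega) (by omega)
        rw [hstepB, heq]
        set p := pfLoopB s s.reverse s.length fuel i (j + 1) with hp
        refine ⟨?_, by omega, by omega, by omega, by omega, by omega⟩
        have hdrop : s.reverse.drop j = s.reverse[j]'hjrev :: s.reverse.drop (j + 1) :=
          List.drop_eq_getElem_cons hjrev
        have htk : p.2 - j = (p.2 - (j + 1)) + 1 := by omega
        rw [hdrop, htk, List.take_succ_cons, hcval, List.append_assoc]
        simp only [Prod.mk.injEq]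
        exact ⟨by simp, by push_cast; ring⟩
    · have hcondA : ¬ (i : Int) ≤ (s.length : Int) - 1 - (j : Int) := by omega
      rw [pfLoopA, pfLoopB, if_neg hcondA, if_neg h]
      refine ⟨?_, le_refl _, le_refl _, by omega, by omega, by omega⟩
      simp

-- ===== VERDICT (by name: the statement is the Claim_ definition above) =====
theorem palindrome_finder_fewest_spec : Claim_equal_palindrome_finder_fewest := by
  intro string _
  show palindrome_finder_fewest string = palindrome_finder_fewest_alt string
  simp only [palindrome_finder_fewest, palindrome_finder_fewest_alt]
  set s := string.toList with hs
  obtain ⟨heq, hi, hj, hlo, hhi, hjn⟩ :=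
    loops_corr s (s.length + 1) 0 0 [] 0 (by omega) (by omega) (by omega)
  set p := pfLoopB s s.reverse s.length (s.length + 1) 0 0 with hp
  have heq' : pfLoopA s (s.length + 1) [] 0 0 ((s.length : Int) - 1) =
      (s.reverse.take p.2, ((p.2 : Int) - (p.1 : Int))) := by
    have : ((s.length : Int) - 1 - ((0 : Nat) : Int)) = (s.length : Int) - 1 := by omega
    rw [this] at heq
    simp only [Nat.cast_zero, List.drop_zero, Nat.sub_zero, List.nil_append,
      sub_zero, add_zero, zero_add] at heq
    exact heq
  rw [heq']
  set suf := s.drop (s.length - p.2) with hsuf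
  have hL : s.reverse.take p.2 = suf.reverse := List.take_reverse
  have hcond : (((s.length : Int) + ((p.2 : Int) - (p.1 : Int))) % 2 ≠ 0) ↔
      p.1 + p.2 = s.length + 1 := by omega
  by_cases hodd : p.1 + p.2 = s.length + 1
  · rw [if_pos (hcond.mpr hodd), if_pos hodd]
    simp [hL]
  · rw [if_neg (fun hx => hodd (hcond.mp hx)), if_neg hodd]
    simp [hL]
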